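-- pv_equiv track=rewrite | github.com/INF1007-2020A/2021h-ch5-exercices-KinanToutoungy | exercice.py | verify_ages
-- ===== SOURCE A (Python) =====
-- from typing import List
--
-- def verify_ages(groups: List[List[int]]) -> List[bool]:
--     acceptance = []
--     for group in groups:
--         if len(group) > 10 or len(group) <= 3:
--             acceptance.append(False)
--             continue
--         if 25 in group:
--             acceptance.append(True)
--             continue
--
--         if 50 in group:
--             is_50 = True
--         else:
--             is_50 = False
--
--         is_accepted = True
--         for age in group:
--             if (age < 18) or (is_50 and age > 70):
--                 is_accepted = False
--                 break
--
--         acceptance.append(is_accepted)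
--     return acceptance
-- ===== SOURCE B (Python) =====
-- from typing import List
--
-- def verify_ages(groups: List[List[int]]) -> List[bool]:
--     def has(s: List[int], x: int) -> bool:
--         # binary search membership in the sorted list s
--         lo, hi = 0, len(s)
--         while lo < hi:
--             mid = (lo + hi) // 2
--             if s[mid] < x:
--                 lo = mid + 1
--             else:
--                 hi = mid
--         return lo < len(s) and s[lo] == x
--
--     def ok(g: List[int]) -> bool:
--         if not (3 < len(g) <= 10):
--             return False
--         s = sorted(g)
--         if has(s, 25):
--             return True
--         return s[0] >= 18 and (not has(s, 50) or s[-1] <= 70)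
--
--     res = []
--     for g in groups:
--         res.append(ok(g))
--     return res
-- ===== Notes on version B (the rewrite author's own statement) =====
-- stated objective: alternative
-- what changed: Each group is sorted once; acceptance is then decided from the sorted list's endpoints (s[0]>=18, s[-1]<=70) and hand-rolled binary searches for 25 and 50, replacing A's linear membership tests and short-circuiting flag loop.
import Mathlib
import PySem

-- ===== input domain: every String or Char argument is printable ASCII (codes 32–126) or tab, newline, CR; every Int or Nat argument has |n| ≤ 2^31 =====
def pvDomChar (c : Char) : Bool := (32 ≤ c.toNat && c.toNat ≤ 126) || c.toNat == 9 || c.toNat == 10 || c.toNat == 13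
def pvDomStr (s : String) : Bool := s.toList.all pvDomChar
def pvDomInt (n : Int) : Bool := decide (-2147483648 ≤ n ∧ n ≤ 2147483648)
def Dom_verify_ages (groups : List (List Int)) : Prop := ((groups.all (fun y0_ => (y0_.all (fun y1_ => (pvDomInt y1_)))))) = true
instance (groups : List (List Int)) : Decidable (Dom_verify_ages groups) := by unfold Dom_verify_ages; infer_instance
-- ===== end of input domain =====

-- B sorts each admissible group once and decides acceptance from the sorted list's
-- endpoints plus binary-search membership tests for 25 and 50 (objective: alternative).

-- ===== PORT A =====
-- the inner 'for age in group' loop with its break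
def verifyAgesLoop (is50 : Bool) : List Int → Bool
  | [] => true
  | age :: rest =>
      if age < 18 ∨ (is50 ∧ age > 70) then false else verifyAgesLoop is50 rest

def verify_ages (groups : List (List Int)) : List Bool :=
  groups.foldl (fun acceptance group =>
    if group.length > 10 ∨ group.length ≤ 3 then acceptance ++ [false]
    else if group.contains 25 then acceptance ++ [true]
    else
      let is50 : Bool := group.contains 50
      acceptance ++ [verifyAgesLoop is50 group]) []

-- ===== PORT B =====
-- Source B's 'while lo < hi' binary-search loop; every s[mid] access it makes has
-- lo ≤ mid < hi ≤ len s, so getD with a default is exact there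
def bsLoop (s : List Int) (x : Int) (lo hi : Nat) : Nat :=
  if lo < hi then
    let mid := (lo + hi) / 2
    if s.getD mid 0 < x then bsLoop s x (mid + 1) hi else bsLoop s x lo mid
  else lo
termination_by hi - lo
decreasing_by all_goals omega

-- Source B's helper 'has(s, x)'
def bsHas (s : List Int) (x : Int) : Bool :=
  let lo := bsLoop s x 0 s.length
  decide (lo < s.length) && decide (s.getD lo 0 = x)

-- Source B's helper 'ok(g)'; s[0] and s[-1] are in range (3 < len g), so getD/pyGetD are exact
def verifyAgesOk (g : List Int) : Bool :=
  if ¬ (3 < g.length ∧ g.length ≤ 10) then false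
  else
    let s := PySem.List.sorted g (fun x => x) false
    if bsHas s 25 then true
    else decide (18 ≤ s.getD 0 0) && (!bsHas s 50 || decide (PySem.List.pyGetD s (-1) 0 ≤ 70))

def verify_ages_alt (groups : List (List Int)) : List Bool :=
  groups.foldl (fun res g => res ++ [verifyAgesOk g]) []

-- ===== PRECONDITION & SPEC =====
def Spec_verify_ages (groups : List (List Int)) (out : List Bool) : Prop := out = verify_ages_alt groups
instance (groups : List (List Int)) (out : List Bool) : Decidable (Spec_verify_ages groups out) := by unfold Spec_verify_ages; infer_instance

-- ===== CLAIM (what is proved, stated in full; the proofs are below) =====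
def Claim_equal_verify_ages : Prop := ∀ (groups : List (List Int)), Dom_verify_ages groups → Spec_verify_ages groups (verify_ages groups)

-- ===== LEMMAS AND PROOFS =====

-- A's inner break loop is the universal check
theorem verifyAgesLoop_eq_all (is50 : Bool) (g : List Int) :
    verifyAgesLoop is50 g = g.all (fun a => decide (18 ≤ a) && (!is50 || decide (a ≤ 70))) := by
  induction g with
  | nil => rfl
  | cons a t ih =>
    simp only [verifyAgesLoop, List.all_cons]
    by_cases h : a < 18 ∨ (is50 ∧ a > 70)
    · rw [if_pos h]
      rcases h with h | ⟨h1, h2⟩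
      · have : ¬ (18 ≤ a) := by omega
        simp [this]
      · have : ¬ (a ≤ 70) := by omega
        simp [h1, this]
    · rw [if_neg h, ih]
      push Not at h
      obtain ⟨h1, h2⟩ := h
      have h1' : 18 ≤ a := by omega
      rcases Bool.eq_false_or_eq_true is50 with h5 | h5
      · have h2' : a ≤ 70 := h2 h5
        simp [h5, h1', h2']
      · simp [h5, h1']

-- invariant of the binary-search loop on a getD-monotone list
theorem bsLoop_inv (s : List Int) (x : Int)
    (hmono : ∀ p q : Nat, p ≤ q → q < s.length → s.getD p 0 ≤ s.getD q 0)
    (n lo hi : Nat) (hn : hi - lo = n)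
    (hhi : hi ≤ s.length) (hlohi : lo ≤ hi)
    (hlo : ∀ i, i < lo → s.getD i 0 < x)
    (hhi' : ∀ i, hi ≤ i → i < s.length → x ≤ s.getD i 0) :
    lo ≤ bsLoop s x lo hi ∧ bsLoop s x lo hi ≤ hi ∧
    (∀ i, i < bsLoop s x lo hi → s.getD i 0 < x) ∧
    (∀ i, bsLoop s x lo hi ≤ i → i < s.length → x ≤ s.getD i 0) := by
  induction n using Nat.strong_induction_on generalizing lo hi with
  | _ n ih =>
    by_cases h : lo < hi
    · rw [bsLoop, if_pos h]
      set mid := (lo + hi) / 2 with hmid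
      by_cases hc : s.getD mid 0 < x
      · rw [if_pos hc]
        have := ih (hi - (mid + 1)) (by omega) (mid + 1) hi (by omega) hhi (by omega)
          (fun i hilt => lt_of_le_of_lt (hmono i mid (by omega) (by omega)) hc)
          hhi'
        exact ⟨by omega, by omega, this.2.2.1, this.2.2.2⟩
      · rw [if_neg hc]
        have := ih (mid - lo) (by omega) lo mid (by omega) (by omega) (by omega)
          hlo
          (fun i hge hlen => le_trans (by omega) (hmono mid i hge hlen))
        exact ⟨this.1, by omega, this.2.2.1, this.2.2.2⟩
    · rw [bsLoop, if_neg h]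
      exact ⟨le_refl _, by omega, hlo, fun i hge hlen => hhi' i (by omega) hlen⟩

-- on a getD-monotone (sorted) list, bsHas decides membership
theorem bsHas_eq_mem (s : List Int) (x : Int)
    (hmono : ∀ p q : Nat, p ≤ q → q < s.length → s.getD p 0 ≤ s.getD q 0) :
    bsHas s x = true ↔ x ∈ s := by
  unfold bsHas
  obtain ⟨-, hle, hbelow, habove⟩ := bsLoop_inv s x hmono s.length 0 s.length rfl
    (le_refl _) (Nat.zero_le _) (by omega) (by omega)
  set r := bsLoop s x 0 s.length with hr
  simp only [Bool.and_eq_true, decide_eq_true_eq]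
  constructor
  · rintro ⟨h1, h2⟩
    rw [← h2, List.getD_eq_getElem s 0 h1]
    exact List.getElem_mem h1
  · intro hmem
    obtain ⟨i, hilen, hieq⟩ := List.mem_iff_getElem.mp hmem
    have hgd : s.getD i 0 = x := by rw [List.getD_eq_getElem s 0 hilen, hieq]
    have hir : r ≤ i := by
      by_contra hlt
      exact absurd hgd (by have := hbelow i (by omega); omega)
    have h1 : r < s.length := by omega
    have h2 : x ≤ s.getD r 0 := habove r (le_refl _) h1
    have h3 : s.getD r 0 ≤ s.getD i 0 := hmono r i hir hilen
    exact ⟨h1, by omega⟩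

-- per-group agreement between A's loop body and B's sorted-endpoint predicate
theorem group_agree (g : List Int) :
    (if g.length > 10 ∨ g.length ≤ 3 then false
     else if g.contains 25 then true
     else verifyAgesLoop (g.contains 50) g) = verifyAgesOk g := by
  unfold verifyAgesOk
  by_cases hsz : g.length > 10 ∨ g.length ≤ 3
  · rw [if_pos hsz, if_pos (show ¬ (3 < g.length ∧ g.length ≤ 10) by omega)]
  · rw [if_neg hsz, if_neg (show ¬ ¬ (3 < g.length ∧ g.length ≤ 10) by omega)]
    simp only []
    have hmono : ∀ p q : Nat, p ≤ q → q < (PySem.List.sorted g (fun x => x) false).length →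
        (PySem.List.sorted g (fun x => x) false).getD p 0 ≤ (PySem.List.sorted g (fun x => x) false).getD q 0 := by
      intro p q hpq hq
      rw [List.getD_eq_getElem _ 0 (by omega), List.getD_eq_getElem _ 0 hq]
      exact PySem.List.sorted_id_getElem_mono g hpq hq
    generalize hs : PySem.List.sorted g (fun x => x) false = s at hmono
    have hlen : s.length = g.length := by
      rw [← hs]; exact PySem.List.length_sorted g _ false
    have hne : s ≠ [] := by
      intro h; rw [h] at hlen; simp at hlen; omega
    have hmem : ∀ x : Int, x ∈ s ↔ x ∈ g := by
      intro x; rw [← hs]; exact PySem.List.mem_sorted g (fun y => y) false x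
    have h25 : bsHas s 25 = g.contains 25 := by
      rw [Bool.eq_iff_iff, bsHas_eq_mem s 25 hmono, hmem]; simp
    have h50 : bsHas s 50 = g.contains 50 := by
      rw [Bool.eq_iff_iff, bsHas_eq_mem s 50 hmono, hmem]; simp
    have hslen : 0 < s.length := by omega
    have hidx : ∀ a ∈ s, ∃ i : Nat, i < s.length ∧ s.getD i 0 = a := by
      intro a ha
      obtain ⟨i, hi, he⟩ := List.mem_iff_getElem.mp ha
      exact ⟨i, hi, by rw [List.getD_eq_getElem _ 0 hi, he]⟩
    have hmin : (decide (18 ≤ s.getD 0 0) : Bool) = g.all (fun a => decide (18 ≤ a)) := by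
      rw [Bool.eq_iff_iff]
      simp only [decide_eq_true_eq, List.all_eq_true, decide_eq_true_eq]
      constructor
      · intro h a ha
        obtain ⟨i, hi, he⟩ := hidx a ((hmem a).mpr ha)
        have := hmono 0 i (Nat.zero_le _) hi
        omega
      · intro h
        have h0 : s.getD 0 0 ∈ s := by
          rw [List.getD_eq_getElem _ 0 hslen]; exact List.getElem_mem hslen
        exact h _ ((hmem _).mp h0)
    have hlast : PySem.List.pyGetD s (-1) 0 = s.getD (s.length - 1) 0 := by
      rw [PySem.List.pyGetD_neg_one s 0 hne, List.getLast_eq_getElem,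
        List.getD_eq_getElem _ 0 (by omega)]
    have hmax : (decide (PySem.List.pyGetD s (-1) 0 ≤ 70) : Bool) = g.all (fun a => decide (a ≤ 70)) := by
      rw [hlast, Bool.eq_iff_iff]
      simp only [decide_eq_true_eq, List.all_eq_true, decide_eq_true_eq]
      constructor
      · intro h a ha
        obtain ⟨i, hi, he⟩ := hidx a ((hmem a).mpr ha)
        have := hmono i (s.length - 1) (by omega) (by omega)
        omega
      · intro h
        have h0 : s.getD (s.length - 1) 0 ∈ s := by
          rw [List.getD_eq_getElem _ 0 (by omega)]; exact List.getElem_mem (by omega)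
        exact h _ ((hmem _).mp h0)
    rw [h25, h50, hmin, hmax]
    by_cases hc25 : g.contains 25 = true
    · rw [if_pos hc25, if_pos hc25]
    · rw [if_neg hc25]
      simp only [Bool.not_eq_true] at hc25
      rw [hc25, if_neg (by simp), verifyAgesLoop_eq_all]
      rcases hc50 : g.contains 50 with _ | _
      · simp
      · rw [Bool.eq_iff_iff]
        simp
        exact ⟨fun h => ⟨fun a ha => (h a ha).1, fun a ha => (h a ha).2⟩,
               fun ⟨h1, h2⟩ a ha => ⟨h1 a ha, h2 a ha⟩⟩

-- A's fold appends exactly one element per group, matching B's fold elementwise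
theorem foldl_verify (groups : List (List Int)) (acc : List Bool) :
    groups.foldl (fun acceptance group =>
      if group.length > 10 ∨ group.length ≤ 3 then acceptance ++ [false]
      else if group.contains 25 then acceptance ++ [true]
      else
        let is50 : Bool := group.contains 50
        acceptance ++ [verifyAgesLoop is50 group]) acc
    = acc ++ groups.map verifyAgesOk := by
  induction groups generalizing acc with
  | nil => simp
  | cons g t ih =>
    simp only [List.foldl_cons, List.map_cons]
    have hg := group_agree g
    by_cases hsz : g.length > 10 ∨ g.length ≤ 3
    · rw [if_pos hsz] at hg ⊢
      rw [ih, ← hg]; simp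
    · rw [if_neg hsz] at hg ⊢
      by_cases h25 : g.contains 25 = true
      · rw [if_pos h25] at hg ⊢
        rw [ih, ← hg]; simp
      · rw [if_neg h25] at hg ⊢
        rw [ih, ← hg]; simp

-- ===== VERDICT (by name: the statement is the Claim_ definition above) =====
theorem verify_ages_spec : Claim_equal_verify_ages := by
  intro groups _
  unfold Spec_verify_ages verify_ages verify_ages_alt
  rw [PySem.List.foldl_append_singleton_eq_map]
  simpa using foldl_verify groups []
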